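-- pv_equiv track=rewrite | github.com/iamabhi6345/DSA | oa/q2.py | maxWeightCell
-- ===== SOURCE A (Python) =====
-- def maxWeightCell(N, Edge):
--         wt = [0] * N
--         sum_weight = 0
--         res = 0
--
--         for i in range(N):
--             if Edge[i] != -1:
--                 wt[Edge[i]] += i
--                 if sum_weight <= wt[Edge[i]]:
--                     sum_weight = wt[Edge[i]]
--                     res = Edge[i]
--
--         return res
-- ===== SOURCE B (Python) =====
-- def maxWeightCell(N, Edge):
--     # Pass 1: build the complete incoming-weight table.
--     head = Edge[:max(N, 0)]
--     wt = [0] * max(N, 0)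
--     for i, e in enumerate(head):
--         if e != -1:
--             wt[e] += i
--     # Pass 2: select over the finished table, scanning edges in order so the
--     # tie-break stays "max weight, latest contributing edge wins".
--     best, res = 0, 0
--     for i, e in enumerate(head):
--         if e != -1 and wt[e] >= best:
--             best, res = wt[e], e
--     return res
-- ===== Notes on version B (the rewrite author's own statement) =====
-- stated objective: alternative
-- what changed: A's single fused loop that accumulates weights while tracking a running maximum over partial sums is replaced by two independent passes: one builds the complete incoming-weight table over enumerate(Edge[:N]), then a separate selection scan compares against the finished totals (same result only because of the 'max weight, latest contributing edge wins' tie-break, which is what the proof establishes).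
import Mathlib
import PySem

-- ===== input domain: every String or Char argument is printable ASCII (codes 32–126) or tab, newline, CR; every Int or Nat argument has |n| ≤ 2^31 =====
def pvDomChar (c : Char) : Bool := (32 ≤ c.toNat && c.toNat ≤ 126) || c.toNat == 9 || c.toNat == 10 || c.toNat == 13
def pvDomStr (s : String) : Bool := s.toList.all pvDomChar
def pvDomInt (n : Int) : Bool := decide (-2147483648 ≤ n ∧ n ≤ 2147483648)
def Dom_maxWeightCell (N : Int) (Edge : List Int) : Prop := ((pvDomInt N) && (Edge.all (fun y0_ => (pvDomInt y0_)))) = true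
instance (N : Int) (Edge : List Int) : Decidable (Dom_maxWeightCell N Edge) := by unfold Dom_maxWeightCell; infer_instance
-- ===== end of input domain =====

-- B replaces A's fused accumulate-and-track loop by two independent passes (build the
-- complete weight table, then a separate selection scan over the finished table); same
-- cost, alternative decomposition. Equality of the return values is proved below.

-- ===== PORT A =====
-- literal transliteration of A: one fused loop carrying (wt, sum_weight, res)
def maxWeightCell (N : Int) (Edge : List Int) : Int :=
  (((PySem.List.pyRange 0 N 1).foldl
    (fun (st : List Int × Int × Int) (i : Int) =>
      let e := PySem.List.pyGetD Edge i 0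
      if e ≠ -1 then
        let wt' := PySem.List.pySetD st.1 e (PySem.List.pyGetD st.1 e 0 + i)
        let w := PySem.List.pyGetD wt' e 0
        if st.2.1 ≤ w then (wt', w, e) else (wt', st.2.1, st.2.2)
      else st)
    (List.replicate N.toNat 0, 0, 0))).2.2

-- ===== PORT B =====
-- literal transliteration of B: pass 1 builds wt over enumerate(head), pass 2 selects
-- over the finished wt, again scanning enumerate(head)
def maxWeightCell_alt (N : Int) (Edge : List Int) : Int :=
  let head := PySem.List.slice Edge none (some (max N 0))
  let wt := (PySem.List.enumerate head 0).foldl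
    (fun (wt : List Int) (ie : Int × Int) =>
      if ie.2 ≠ -1 then PySem.List.pySetD wt ie.2 (PySem.List.pyGetD wt ie.2 0 + ie.1) else wt)
    (List.replicate (max N 0).toNat 0)
  (((PySem.List.enumerate head 0).foldl
    (fun (br : Int × Int) (ie : Int × Int) =>
      if ie.2 ≠ -1 ∧ br.1 ≤ PySem.List.pyGetD wt ie.2 0 then (PySem.List.pyGetD wt ie.2 0, ie.2) else br)
    (0, 0))).2

-- ===== PRECONDITION & SPEC =====
-- Pre_ is exactly A's non-raising domain: every i in range(N) must be a valid index
-- into Edge, and every Edge[i] other than the sentinel -1 must be a valid (possibly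
-- negative, Python-wraparound) index into the length-N table wt.
def Pre_maxWeightCell (N : Int) (Edge : List Int) : Prop :=
  (0 < N → N ≤ Edge.length) ∧
  ∀ i ∈ List.range N.toNat, Edge.getD i 0 = -1 ∨ (-N ≤ Edge.getD i 0 ∧ Edge.getD i 0 < N)
instance (N : Int) (Edge : List Int) : Decidable (Pre_maxWeightCell N Edge) := by
  unfold Pre_maxWeightCell; infer_instance

def pvWitness_maxWeightCell : Int × List Int := (4, [2, -1, 2, -3])

def Spec_maxWeightCell (N : Int) (Edge : List Int) (out : Int) : Prop := out = maxWeightCell_alt N Edge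
instance (N : Int) (Edge : List Int) (out : Int) : Decidable (Spec_maxWeightCell N Edge out) := by unfold Spec_maxWeightCell; infer_instance

-- ===== CLAIM (what is proved, stated in full; the proofs are below) =====
def Claim_equal_maxWeightCell : Prop := ∀ (N : Int) (Edge : List Int), Dom_maxWeightCell N Edge → Pre_maxWeightCell N Edge → Spec_maxWeightCell N Edge (maxWeightCell N Edge)

-- ===== LEMMAS AND PROOFS =====

-- resolved (Python-wraparound) slot of a raw index e into a length-N table
def pvSlot (N e : Int) : Nat := if e < 0 then (e + N).toNat else e.toNat

-- event list: (edge index k, raw Edge value e, resolved slot) for the active steps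
def pvEvents (N : Int) (Edge : List Int) (l : List Nat) : List (Nat × Int × Nat) :=
  (l.filter (fun k => Edge.getD k 0 ≠ -1)).map
    (fun k => (k, Edge.getD k 0, pvSlot N (Edge.getD k 0)))

-- the clean folds the ports reduce to
def pvTbl (L : List (Nat × Int × Nat)) (wt : List Int) : List Int :=
  L.foldl (fun wt p => wt.set p.2.2 (wt.getD p.2.2 0 + (p.1 : Int))) wt

def pvFused (L : List (Nat × Int × Nat)) (st : List Int × Int × Int) : List Int × Int × Int :=
  L.foldl (fun st p =>
    let wt' := st.1.set p.2.2 (st.1.getD p.2.2 0 + (p.1 : Int))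
    if st.2.1 ≤ wt'.getD p.2.2 0 then (wt', wt'.getD p.2.2 0, p.2.1)
    else (wt', st.2.1, st.2.2)) st

def pvSel (wt : List Int) (L : List (Nat × Int × Nat)) (br : Int × Int) : Int × Int :=
  L.foldl (fun br p => if br.1 ≤ wt.getD p.2.2 0 then (wt.getD p.2.2 0, p.2.1) else br) br

-- characterisation of the selection pass: max hit weight, and value at last achiever
def pvCharS (wt : List Int) (L : List (Nat × Int × Nat)) : Int :=
  L.foldl (fun s p => max s (wt.getD p.2.2 0)) 0

def pvLastAch (wt : List Int) (L : List (Nat × Int × Nat)) (s : Int) : Int :=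
  L.foldl (fun r p => if wt.getD p.2.2 0 = s then p.2.1 else r) 0

-- pyGetD / pySetD with an in-range (possibly negative) index resolve to the slot
lemma pv_res_get (wt : List Int) (N e : Int) (hlen : wt.length = N.toNat)
    (h1 : -N ≤ e) (h2 : e < N) (_hne : e ≠ -1) :
    PySem.List.pyGetD wt e 0 = wt.getD (pvSlot N e) 0 := by
  unfold pvSlot
  by_cases he : e < 0
  · have hk1 : 0 < (-e).toNat := by omega
    have hk2 : (-e).toNat ≤ wt.length := by omega
    have h : e = -(((-e).toNat : Nat) : Int) := by omega
    rw [h, PySem.List.pyGetD_neg_natCast wt _ _ hk1 hk2, if_pos (by omega)]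
    rw [List.getD_eq_getElem?_getD, List.getElem?_eq_getElem (by omega)]
    simp only [Option.getD_some]
    congr 1
    omega
  · rw [PySem.List.pyGetD_of_nonneg wt (0:Int) (by omega), if_neg he]

lemma pv_res_set (wt : List Int) (N e v : Int) (hlen : wt.length = N.toNat)
    (h1 : -N ≤ e) (h2 : e < N) (hne : e ≠ -1) :
    PySem.List.pySetD wt e v = wt.set (pvSlot N e) v := by
  unfold pvSlot
  by_cases he : e < 0
  · simp only [PySem.List.pySetD, PySem.List.pySet?, PySem.List.pyIdx?]
    rw [if_neg (by omega), if_pos (by omega)]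
    simp only [Option.map_some, Option.getD_some]
    rw [if_pos he]
    congr 1
    omega
  · rw [PySem.List.pySetD_of_nonneg wt v (by omega), if_neg he]

lemma pv_slot_lt (N e : Int) (h1 : -N ≤ e) (h2 : e < N) (hne : e ≠ -1) :
    pvSlot N e < N.toNat := by
  unfold pvSlot; split_ifs <;> omega

lemma pvTbl_length (L : List (Nat × Int × Nat)) (wt : List Int) :
    (pvTbl L wt).length = wt.length := by
  unfold pvTbl
  induction L generalizing wt with
  | nil => rfl
  | cons p L ih => rw [List.foldl_cons, ih _]; exact List.length_set ..

lemma pv_foldmax_ge_init (wt : List Int) (L : List (Nat × Int × Nat)) (s0 : Int) :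
    s0 ≤ L.foldl (fun s p => max s (wt.getD p.2.2 0)) s0 := by
  induction L generalizing s0 with
  | nil => simp
  | cons p L ih => exact le_trans (le_max_left _ _) (ih _)

lemma pv_foldmax_ge_elem (wt : List Int) (L : List (Nat × Int × Nat)) (s0 : Int)
    (p : Nat × Int × Nat) (hp : p ∈ L) :
    wt.getD p.2.2 0 ≤ L.foldl (fun s q => max s (wt.getD q.2.2 0)) s0 := by
  induction L generalizing s0 with
  | nil => simp at hp
  | cons q L ih =>
    rw [List.foldl_cons]
    rcases List.mem_cons.1 hp with h | h
    · subst h; exact le_trans (le_max_right _ _) (pv_foldmax_ge_init _ _ _)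
    · exact ih _ h

lemma pv_foldmax_le (wt : List Int) (L : List (Nat × Int × Nat)) (s0 B : Int)
    (h0 : s0 ≤ B) (h : ∀ p ∈ L, wt.getD p.2.2 0 ≤ B) :
    L.foldl (fun s p => max s (wt.getD p.2.2 0)) s0 ≤ B := by
  induction L generalizing s0 with
  | nil => simpa
  | cons p L ih =>
    exact ih _ (max_le h0 (h p List.mem_cons_self)) (fun q hq => h q (List.mem_cons_of_mem _ hq))

lemma pv_foldmax_init_mono (wt : List Int) (L : List (Nat × Int × Nat)) (s0 s1 : Int)
    (h01 : s0 ≤ s1) :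
    L.foldl (fun s p => max s (wt.getD p.2.2 0)) s0 ≤
      L.foldl (fun s p => max s (wt.getD p.2.2 0)) s1 := by
  induction L generalizing s0 s1 with
  | nil => simpa
  | cons p L ih => exact ih _ _ (max_le_max_right _ h01)

lemma pv_foldmax_mono (wt wt' : List Int) (L : List (Nat × Int × Nat)) (s0 : Int)
    (h : ∀ p ∈ L, wt.getD p.2.2 0 ≤ wt'.getD p.2.2 0) :
    L.foldl (fun s p => max s (wt.getD p.2.2 0)) s0 ≤
      L.foldl (fun s p => max s (wt'.getD p.2.2 0)) s0 := by
  induction L generalizing s0 with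
  | nil => simp
  | cons p L ih =>
    calc L.foldl (fun s q => max s (wt.getD q.2.2 0)) (max s0 (wt.getD p.2.2 0))
        ≤ L.foldl (fun s q => max s (wt.getD q.2.2 0)) (max s0 (wt'.getD p.2.2 0)) :=
          pv_foldmax_init_mono _ _ _ _ (max_le_max_left _ (h p List.mem_cons_self))
      _ ≤ _ := ih _ (fun q hq => h q (List.mem_cons_of_mem _ hq))

lemma pv_lastAch_congr (wt wt' : List Int) (L : List (Nat × Int × Nat)) (s s' : Int) (r0 : Int)
    (h : ∀ p ∈ L, (wt.getD p.2.2 0 = s) = (wt'.getD p.2.2 0 = s')) :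
    L.foldl (fun r p => if wt.getD p.2.2 0 = s then p.2.1 else r) r0 =
      L.foldl (fun r p => if wt'.getD p.2.2 0 = s' then p.2.1 else r) r0 := by
  induction L generalizing r0 with
  | nil => rfl
  | cons p L ih =>
    simp only [List.foldl_cons, h p List.mem_cons_self]
    exact ih (h := fun q hq => h q (List.mem_cons_of_mem _ hq)) (r0 := _)

-- the selection pass computes (max hit weight, value at the last achieving event)
lemma pv_sel_char (wt : List Int) (L : List (Nat × Int × Nat)) :
    pvSel wt L (0, 0) = (pvCharS wt L, pvLastAch wt L (pvCharS wt L)) := by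
  induction L using List.reverseRecOn with
  | nil => simp [pvSel, pvCharS, pvLastAch]
  | append_singleton L p ih =>
    simp only [pvSel, pvCharS, pvLastAch, List.foldl_append, List.foldl_cons,
      List.foldl_nil] at ih ⊢
    rw [ih]
    by_cases hc : (List.foldl (fun s p => max s (wt.getD p.2.2 0)) 0 L) ≤ wt.getD p.2.2 0
    · rw [if_pos hc, max_eq_right hc, if_pos rfl]
    · rw [if_neg hc, max_eq_left (le_of_not_ge hc), if_neg (by omega)]
      rfl

lemma pv_getD_set_self (T : List Int) (j : Nat) (x : Int) (h : j < T.length) :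
    (T.set j x).getD j 0 = x := by
  rw [List.getD_eq_getElem?_getD, List.getElem?_set_self (by simpa using h)]
  rfl

lemma pv_getD_set_ne (T : List Int) (j q : Nat) (x : Int) (h : q ≠ j) :
    (T.set j x).getD q 0 = T.getD q 0 := by
  rw [List.getD_eq_getElem?_getD, List.getElem?_set_ne (by omega), ← List.getD_eq_getElem?_getD]

-- CORE: the fused loop equals build-table-then-select (in characterised form)
lemma pv_fused_char (L : List (Nat × Int × Nat)) (wt0 : List Int)
    (hL : ∀ p ∈ L, p.2.2 < wt0.length) :
    pvFused L (wt0, 0, 0) =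
      (pvTbl L wt0, pvCharS (pvTbl L wt0) L, pvLastAch (pvTbl L wt0) L (pvCharS (pvTbl L wt0) L)) := by
  induction L using List.reverseRecOn with
  | nil => simp [pvFused, pvTbl, pvCharS, pvLastAch]
  | append_singleton L p ih =>
    have hLp : ∀ q ∈ L, q.2.2 < wt0.length := fun q hq => hL q (List.mem_append_left _ hq)
    have hj : p.2.2 < (pvTbl L wt0).length := by
      rw [pvTbl_length]; exact hL p (List.mem_append_right _ List.mem_cons_self)
    set T := pvTbl L wt0 with hT
    set v0 := T.getD p.2.2 0 with hv0
    set w' := v0 + (p.1 : Int) with hw'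
    set T' := T.set p.2.2 w' with hT'
    have hT'eq : pvTbl (L ++ [p]) wt0 = T' := by
      simp only [pvTbl, List.foldl_append, List.foldl_cons, List.foldl_nil]; rfl
    have hgetT' : T'.getD p.2.2 0 = w' := pv_getD_set_self T _ _ hj
    have hother : ∀ q : Nat × Int × Nat, q.2.2 ≠ p.2.2 → T'.getD q.2.2 0 = T.getD q.2.2 0 :=
      fun q hq => pv_getD_set_ne T _ _ _ hq
    have hvw : v0 ≤ w' := by omega
    have hs0 : (0:Int) ≤ pvCharS T L := pv_foldmax_ge_init T L 0
    have hstep : pvFused (L ++ [p]) (wt0, 0, 0) =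
        (if pvCharS T L ≤ w' then (T', w', p.2.1) else (T', pvCharS T L, pvLastAch T L (pvCharS T L))) := by
      simp only [pvFused, List.foldl_append, List.foldl_nil, List.foldl_cons]
      rw [show (List.foldl _ (wt0, 0, 0) L : List Int × Int × Int) = _ from ih hLp]
      simp only [← hv0, ← hw', ← hT', hgetT']
    rw [hstep, hT'eq]
    by_cases hc : pvCharS T L ≤ w'
    · rw [if_pos hc]
      have hle : pvCharS T' L ≤ w' := by
        apply pv_foldmax_le _ _ _ _ (le_trans hs0 hc)
        intro q hq
        by_cases hqp : q.2.2 = p.2.2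
        · rw [show T'.getD q.2.2 0 = w' by rw [hqp]; exact hgetT']
        · rw [hother q hqp]; exact le_trans (pv_foldmax_ge_elem T L 0 q hq) hc
      have hcs : pvCharS T' (L ++ [p]) = w' := by
        have hsplit : pvCharS T' (L ++ [p]) = max (pvCharS T' L) (T'.getD p.2.2 0) := by
          simp [pvCharS, List.foldl_append]
        rw [hsplit, hgetT']
        exact max_eq_right hle
      have hla : pvLastAch T' (L ++ [p]) w' = p.2.1 := by
        simp only [pvLastAch, List.foldl_append, List.foldl_cons, List.foldl_nil, hgetT']
        simp
      rw [hcs, hla]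
    · rw [if_neg hc]
      have hw's : w' < pvCharS T L := lt_of_not_ge hc
      have hcsL : pvCharS T' L = pvCharS T L := by
        apply le_antisymm
        · apply pv_foldmax_le _ _ _ _ hs0
          intro q hq
          by_cases hqp : q.2.2 = p.2.2
          · rw [show T'.getD q.2.2 0 = w' by rw [hqp]; exact hgetT']; omega
          · rw [hother q hqp]; exact pv_foldmax_ge_elem T L 0 q hq
        · apply pv_foldmax_mono
          intro q hq
          by_cases hqp : q.2.2 = p.2.2
          · rw [show T'.getD q.2.2 0 = w' by rw [hqp]; exact hgetT',
               show T.getD q.2.2 0 = v0 by rw [hqp]]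
            exact hvw
          · rw [hother q hqp]
      have hcs : pvCharS T' (L ++ [p]) = pvCharS T L := by
        have hsplit : pvCharS T' (L ++ [p]) = max (pvCharS T' L) (T'.getD p.2.2 0) := by
          simp [pvCharS, List.foldl_append]
        rw [hsplit, hgetT', hcsL]
        omega
      have hla : pvLastAch T' (L ++ [p]) (pvCharS T L) = pvLastAch T L (pvCharS T L) := by
        simp only [pvLastAch, List.foldl_append, List.foldl_cons, List.foldl_nil, hgetT']
        rw [if_neg (by omega)]
        apply pv_lastAch_congr
        intro q hq
        by_cases hqp : q.2.2 = p.2.2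
        · rw [show T'.getD q.2.2 0 = w' by rw [hqp]; exact hgetT',
             show T.getD q.2.2 0 = v0 by rw [hqp]]
          simp only [eq_iff_iff]
          constructor <;> omega
        · rw [hother q hqp]
      rw [hcs, hla]

-- bridge: port A's loop body over index list l is pvFused over the event list
lemma pv_bridgeA_gen (N : Int) (Edge : List Int) (l : List Nat) (st : List Int × Int × Int)
    (hlen : st.1.length = N.toNat)
    (hc : ∀ k ∈ l, Edge.getD k 0 = -1 ∨ (-N ≤ Edge.getD k 0 ∧ Edge.getD k 0 < N)) :
    l.foldl (fun (st : List Int × Int × Int) (k : Nat) =>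
      let e := PySem.List.pyGetD Edge (↑k) 0
      if e ≠ -1 then
        let wt' := PySem.List.pySetD st.1 e (PySem.List.pyGetD st.1 e 0 + ↑k)
        let w := PySem.List.pyGetD wt' e 0
        if st.2.1 ≤ w then (wt', w, e) else (wt', st.2.1, st.2.2)
      else st) st
    = pvFused (pvEvents N Edge l) st := by
  induction l generalizing st with
  | nil => rfl
  | cons k l ih =>
    rw [List.foldl_cons]
    by_cases he : Edge.getD k 0 = -1
    · have he' : Edge[k]?.getD 0 = -1 := by simpa using he
      have hev : pvEvents N Edge (k :: l) = pvEvents N Edge l := by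
        simp [pvEvents, List.filter_cons]
        rw [if_pos he']
      have hbody : (let e := PySem.List.pyGetD Edge (↑k) 0
          if e ≠ -1 then
            let wt' := PySem.List.pySetD st.1 e (PySem.List.pyGetD st.1 e 0 + ↑k)
            let w := PySem.List.pyGetD wt' e 0
            if st.2.1 ≤ w then (wt', w, e) else (wt', st.2.1, st.2.2)
          else st) = st := by
        simp only [PySem.List.pyGetD_natCast]
        rw [if_neg (fun h => h he)]
      rw [hev, hbody]
      exact ih st hlen (fun q hq => hc q (List.mem_cons_of_mem _ hq))
    · obtain ⟨h1, h2⟩ := (hc k List.mem_cons_self).resolve_left he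
      have he' : ¬ Edge[k]?.getD 0 = -1 := by simpa using he
      have hev : pvEvents N Edge (k :: l) =
          (k, Edge.getD k 0, pvSlot N (Edge.getD k 0)) :: pvEvents N Edge l := by
        simp [pvEvents, List.filter_cons]
        rw [if_neg he', List.map_cons]
      have hbody : (let e := PySem.List.pyGetD Edge (↑k) 0
          if e ≠ -1 then
            let wt' := PySem.List.pySetD st.1 e (PySem.List.pyGetD st.1 e 0 + ↑k)
            let w := PySem.List.pyGetD wt' e 0
            if st.2.1 ≤ w then (wt', w, e) else (wt', st.2.1, st.2.2)
          else st) =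
          (if st.2.1 ≤ (st.1.set (pvSlot N (Edge.getD k 0)) (st.1.getD (pvSlot N (Edge.getD k 0)) 0 + (k : Int))).getD (pvSlot N (Edge.getD k 0)) 0
            then (st.1.set (pvSlot N (Edge.getD k 0)) (st.1.getD (pvSlot N (Edge.getD k 0)) 0 + (k : Int)),
                  (st.1.set (pvSlot N (Edge.getD k 0)) (st.1.getD (pvSlot N (Edge.getD k 0)) 0 + (k : Int))).getD (pvSlot N (Edge.getD k 0)) 0,
                  Edge.getD k 0)
            else (st.1.set (pvSlot N (Edge.getD k 0)) (st.1.getD (pvSlot N (Edge.getD k 0)) 0 + (k : Int)), st.2.1, st.2.2)) := by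
        simp only [PySem.List.pyGetD_natCast]
        rw [if_pos he]
        rw [pv_res_set st.1 N _ _ hlen h1 h2 he,
            pv_res_get st.1 N _ hlen h1 h2 he,
            pv_res_get (st.1.set (pvSlot N (Edge.getD k 0)) _) N _ (by simpa using hlen) h1 h2 he]
      have hstep : pvFused ((k, Edge.getD k 0, pvSlot N (Edge.getD k 0)) :: pvEvents N Edge l) st =
          pvFused (pvEvents N Edge l)
          (if st.2.1 ≤ (st.1.set (pvSlot N (Edge.getD k 0)) (st.1.getD (pvSlot N (Edge.getD k 0)) 0 + (k : Int))).getD (pvSlot N (Edge.getD k 0)) 0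
            then (st.1.set (pvSlot N (Edge.getD k 0)) (st.1.getD (pvSlot N (Edge.getD k 0)) 0 + (k : Int)),
                  (st.1.set (pvSlot N (Edge.getD k 0)) (st.1.getD (pvSlot N (Edge.getD k 0)) 0 + (k : Int))).getD (pvSlot N (Edge.getD k 0)) 0,
                  Edge.getD k 0)
            else (st.1.set (pvSlot N (Edge.getD k 0)) (st.1.getD (pvSlot N (Edge.getD k 0)) 0 + (k : Int)), st.2.1, st.2.2)) := rfl
      rw [hev, hbody, hstep]
      refine ih _ ?_ (fun q hq => hc q (List.mem_cons_of_mem _ hq))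
      split_ifs <;> simpa using hlen

-- bridge: port B's first pass over index list l is pvTbl over the event list
lemma pv_bridgeT_gen (N : Int) (Edge : List Int) (l : List Nat) (wt : List Int)
    (hlen : wt.length = N.toNat)
    (hc : ∀ k ∈ l, Edge.getD k 0 = -1 ∨ (-N ≤ Edge.getD k 0 ∧ Edge.getD k 0 < N)) :
    l.foldl (fun (wt : List Int) (k : Nat) =>
      if Edge.getD k 0 ≠ -1 then
        PySem.List.pySetD wt (Edge.getD k 0) (PySem.List.pyGetD wt (Edge.getD k 0) 0 + (k : Int))
      else wt) wt
    = pvTbl (pvEvents N Edge l) wt := by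
  induction l generalizing wt with
  | nil => rfl
  | cons k l ih =>
    rw [List.foldl_cons]
    by_cases he : Edge.getD k 0 = -1
    · have he' : Edge[k]?.getD 0 = -1 := by simpa using he
      have hev : pvEvents N Edge (k :: l) = pvEvents N Edge l := by
        simp [pvEvents, List.filter_cons]
        rw [if_pos he']
      rw [hev, if_neg (fun h => h he)]
      exact ih wt hlen (fun q hq => hc q (List.mem_cons_of_mem _ hq))
    · obtain ⟨h1, h2⟩ := (hc k List.mem_cons_self).resolve_left he
      have he' : ¬ Edge[k]?.getD 0 = -1 := by simpa using he
      have hev : pvEvents N Edge (k :: l) =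
          (k, Edge.getD k 0, pvSlot N (Edge.getD k 0)) :: pvEvents N Edge l := by
        simp [pvEvents, List.filter_cons]
        rw [if_neg he', List.map_cons]
      have hbody : (if Edge.getD k 0 ≠ -1 then
            PySem.List.pySetD wt (Edge.getD k 0) (PySem.List.pyGetD wt (Edge.getD k 0) 0 + (k : Int))
          else wt) =
          wt.set (pvSlot N (Edge.getD k 0)) (wt.getD (pvSlot N (Edge.getD k 0)) 0 + (k : Int)) := by
        rw [if_pos he]
        rw [pv_res_set wt N _ _ hlen h1 h2 he, pv_res_get wt N _ hlen h1 h2 he]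
      have hstep : pvTbl ((k, Edge.getD k 0, pvSlot N (Edge.getD k 0)) :: pvEvents N Edge l) wt =
          pvTbl (pvEvents N Edge l)
            (wt.set (pvSlot N (Edge.getD k 0)) (wt.getD (pvSlot N (Edge.getD k 0)) 0 + (k : Int))) := rfl
      rw [hev, hbody, hstep]
      exact ih _ (by simpa using hlen) (fun q hq => hc q (List.mem_cons_of_mem _ hq))

-- bridge: port B's second pass over index list l is pvSel over the event list
lemma pv_bridgeS_gen (N : Int) (Edge : List Int) (wt : List Int) (hlen : wt.length = N.toNat)
    (l : List Nat) (br : Int × Int)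
    (hc : ∀ k ∈ l, Edge.getD k 0 = -1 ∨ (-N ≤ Edge.getD k 0 ∧ Edge.getD k 0 < N)) :
    l.foldl (fun (br : Int × Int) (k : Nat) =>
      if Edge.getD k 0 ≠ -1 ∧ br.1 ≤ PySem.List.pyGetD wt (Edge.getD k 0) 0
        then (PySem.List.pyGetD wt (Edge.getD k 0) 0, Edge.getD k 0) else br) br
    = pvSel wt (pvEvents N Edge l) br := by
  induction l generalizing br with
  | nil => rfl
  | cons k l ih =>
    rw [List.foldl_cons]
    by_cases he : Edge.getD k 0 = -1
    · have he' : Edge[k]?.getD 0 = -1 := by simpa using he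
      have hev : pvEvents N Edge (k :: l) = pvEvents N Edge l := by
        simp [pvEvents, List.filter_cons]
        rw [if_pos he']
      rw [hev, if_neg (fun h => h.1 he)]
      exact ih br (fun q hq => hc q (List.mem_cons_of_mem _ hq))
    · obtain ⟨h1, h2⟩ := (hc k List.mem_cons_self).resolve_left he
      have he' : ¬ Edge[k]?.getD 0 = -1 := by simpa using he
      have hev : pvEvents N Edge (k :: l) =
          (k, Edge.getD k 0, pvSlot N (Edge.getD k 0)) :: pvEvents N Edge l := by
        simp [pvEvents, List.filter_cons]
        rw [if_neg he', List.map_cons]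
      have hbody : (if Edge.getD k 0 ≠ -1 ∧ br.1 ≤ PySem.List.pyGetD wt (Edge.getD k 0) 0
            then (PySem.List.pyGetD wt (Edge.getD k 0) 0, Edge.getD k 0) else br) =
          (if br.1 ≤ wt.getD (pvSlot N (Edge.getD k 0)) 0
            then (wt.getD (pvSlot N (Edge.getD k 0)) 0, Edge.getD k 0) else br) := by
        rw [pv_res_get wt N _ hlen h1 h2 he]
        by_cases hcc : br.1 ≤ wt.getD (pvSlot N (Edge.getD k 0)) 0
        · rw [if_pos ⟨he, hcc⟩, if_pos hcc]
        · rw [if_neg (by tauto), if_neg hcc]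
      have hstep : pvSel wt ((k, Edge.getD k 0, pvSlot N (Edge.getD k 0)) :: pvEvents N Edge l) br =
          pvSel wt (pvEvents N Edge l)
            (if br.1 ≤ wt.getD (pvSlot N (Edge.getD k 0)) 0
              then (wt.getD (pvSlot N (Edge.getD k 0)) 0, Edge.getD k 0) else br) := rfl
      rw [hev, hbody, hstep]
      exact ih _ (fun q hq => hc q (List.mem_cons_of_mem _ hq))

-- enumerate(xs) is the index range zipped with the elements
lemma pv_enum_eq (xs : List Int) (s : Int) :
    PySem.List.enumerate xs s = (List.range xs.length).map (fun (k : Nat) => (s + (k : Int), xs.getD k 0)) := by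
  induction xs generalizing s with
  | nil => rfl
  | cons x xs ih =>
    rw [PySem.List.enumerate_cons, ih (s + 1)]
    simp only [List.length_cons, List.range_succ_eq_map, List.map_cons, List.map_map]
    refine List.cons_eq_cons.mpr ⟨by simp, ?_⟩
    apply List.map_congr_left
    intro k _
    simp only [Function.comp_apply, List.getD_cons_succ, Prod.mk.injEq]
    exact ⟨by push_cast; ring, trivial⟩

-- a fold of a pair-consuming body over enumerate(Edge.take n) is the fold of the
-- index-consuming body over range n (n ≤ Edge.length)
lemma pv_enum_fold {β : Type} (Edge : List Int) (n : Nat) (hn : n ≤ Edge.length)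
    (f : β → Int × Int → β) (b : β) :
    (PySem.List.enumerate (Edge.take n) 0).foldl f b =
      (List.range n).foldl (fun a (k : Nat) => f a ((k : Int), Edge.getD k 0)) b := by
  rw [pv_enum_eq, List.foldl_map, List.length_take, Nat.min_eq_left hn]
  apply PySem.List.foldl_congr_mem
  intro acc k hk
  have hk' : k < n := List.mem_range.1 hk
  have h1 : (0 : Int) + (k : Int) = (k : Int) := by omega
  have h2 : (Edge.take n).getD k 0 = Edge.getD k 0 := by
    rw [List.getD_eq_getElem?_getD, List.getD_eq_getElem?_getD, List.getElem?_take_of_lt hk']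
  rw [h1, h2]

-- turn the fold over pyRange(0, N) into a fold over List.range N.toNat
lemma pv_range_fold {β : Type} (N : Int) (f : β → Int → β) (b : β) :
    (PySem.List.pyRange 0 N 1).foldl f b =
      (List.range N.toNat).foldl (fun a (k : Nat) => f a (↑k)) b := by
  rw [PySem.List.pyRange_one]
  simp [List.foldl_map]

lemma pv_bridgeA (N : Int) (Edge : List Int) (hpre : Pre_maxWeightCell N Edge) :
    maxWeightCell N Edge = (pvFused (pvEvents N Edge (List.range N.toNat)) (List.replicate N.toNat 0, 0, 0)).2.2 := by
  unfold maxWeightCell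
  rw [pv_range_fold]
  rw [pv_bridgeA_gen N Edge _ _ (by simp) (fun k hk => hpre.2 k hk)]

lemma pv_bridgeB (N : Int) (Edge : List Int) (hpre : Pre_maxWeightCell N Edge) :
    maxWeightCell_alt N Edge =
      (pvSel (pvTbl (pvEvents N Edge (List.range N.toNat)) (List.replicate N.toNat 0))
        (pvEvents N Edge (List.range N.toNat)) (0, 0)).2 := by
  have hmax : (max N 0).toNat = N.toNat := by omega
  have hn : N.toNat ≤ Edge.length := by
    rcases le_or_gt N 0 with h | h
    · simp [Int.toNat_of_nonpos h]
    · have := hpre.1 h; omega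
  have hhead : PySem.List.slice Edge none (some (max N 0)) = Edge.take N.toNat := by
    rw [PySem.List.slice_to Edge (by omega), hmax]
  have hT : (PySem.List.enumerate (Edge.take N.toNat) 0).foldl
      (fun (wt : List Int) (ie : Int × Int) =>
        if ie.2 ≠ -1 then PySem.List.pySetD wt ie.2 (PySem.List.pyGetD wt ie.2 0 + ie.1) else wt)
      (List.replicate N.toNat 0)
      = pvTbl (pvEvents N Edge (List.range N.toNat)) (List.replicate N.toNat 0) := by
    rw [pv_enum_fold Edge N.toNat hn]
    exact pv_bridgeT_gen N Edge _ _ (by simp) (fun k hk => hpre.2 k hk)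
  have hS : (PySem.List.enumerate (Edge.take N.toNat) 0).foldl
      (fun (br : Int × Int) (ie : Int × Int) =>
        if ie.2 ≠ -1 ∧ br.1 ≤ PySem.List.pyGetD (pvTbl (pvEvents N Edge (List.range N.toNat)) (List.replicate N.toNat 0)) ie.2 0
          then (PySem.List.pyGetD (pvTbl (pvEvents N Edge (List.range N.toNat)) (List.replicate N.toNat 0)) ie.2 0, ie.2) else br)
      (0, 0)
      = pvSel (pvTbl (pvEvents N Edge (List.range N.toNat)) (List.replicate N.toNat 0))
          (pvEvents N Edge (List.range N.toNat)) (0, 0) := by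
    rw [pv_enum_fold Edge N.toNat hn]
    exact pv_bridgeS_gen N Edge _ (by rw [pvTbl_length]; simp) _ _ (fun k hk => hpre.2 k hk)
  simp only [maxWeightCell_alt]
  rw [hhead, hmax, hT, hS]

-- ===== VERDICT (by name: the statement is the Claim_ definition above) =====
theorem maxWeightCell_spec : Claim_equal_maxWeightCell := by
  intro N Edge _ hpre
  unfold Spec_maxWeightCell
  rw [pv_bridgeA N Edge hpre, pv_bridgeB N Edge hpre,
    pv_sel_char, pv_fused_char]
  · intro p hp
    simp only [pvEvents, List.mem_map, List.mem_filter, List.mem_range] at hp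
    obtain ⟨k, ⟨hk, hne⟩, rfl⟩ := hp
    simp only [List.length_replicate]
    exact pv_slot_lt N _ ((hpre.2 k (List.mem_range.2 hk)).resolve_left (by simpa using hne)).1
      ((hpre.2 k (List.mem_range.2 hk)).resolve_left (by simpa using hne)).2 (by simpa using hne)
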